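-- pv_equiv track=rewrite | github.com/MartingaleCoda/SeatPermutations | SeatPermutations.py | get_successes
-- ===== SOURCE A (Python) =====
-- def get_successes(placement, seat_perms_x_match, num_matches_for_funded):
--     '''Gets the number of successes after rotations
--
--     Checks all rotations of the lists of interest to see if all rotations result in a match count lower than the
--     num_matches_for_funded.  This can be better than checking if any match counts are greater than the
--     num_matches_for_funded for diagnostic reasons, but is slower than using the any match check.
--
--     Returns
--     -------
--     successes : List<List<int>>
--
--     Parameters
--     ----------
--     placement: List<int>
--         List of numbers from 1 to num_seats that represent the packages on the table.
--     seat_perms_x_match : List<List<int>>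
--         All permutations of placements where starting matches equals num_starting_matches.
--     num_matches_for_funded: int
--         Number of matches required to be funded.
--     '''
--     successes = list()
--     for list_to_check in seat_perms_x_match:
--         matching_amount_list = list()
--         for j in range(len(list_to_check)):
--             matching = 0
--             rotated_list = list_to_check[-j:] + list_to_check[:-j]
--             for k in range(len(rotated_list)):
--                 if rotated_list[k] == placement[k]:
--                     matching += 1
--             matching_amount_list.append(matching)
--         if all(i < num_matches_for_funded for i in matching_amount_list):
--             successes.append(list_to_check)
--     return successes
-- ===== SOURCE B (Python) =====
-- def get_successes(placement, seat_perms_x_match, num_matches_for_funded):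
--     """Alternative: instead of materializing every rotation (O(n^2) per permutation),
--     build a value->positions index of the placement prefix once per permutation and
--     tally one match per equal (value) pair at its rotation offset (p - i) % n, O(n)
--     per permutation for distinct values."""
--     successes = []
--     for perm in seat_perms_x_match:
--         n = len(perm)
--         pos = {}
--         for p in range(n):
--             pos.setdefault(placement[p], []).append(p)
--         counts = [0] * n
--         for i in range(n):
--             for p in pos.get(perm[i], []):
--                 counts[(p - i) % n] += 1
--         if all(c < num_matches_for_funded for c in counts):
--             successes.append(perm)
--     return successes
-- ===== Notes on version B (the rewrite author's own statement) =====
-- stated objective: faster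
-- what changed: Instead of materializing every rotation of each permutation and rescanning it against the placement (O(n^2) per permutation), B builds a value->positions index of the placement prefix once and adds one match at rotation offset (p-i) mod n per equal pair, giving all n rotation match-counts in one pass.
import Mathlib
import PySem

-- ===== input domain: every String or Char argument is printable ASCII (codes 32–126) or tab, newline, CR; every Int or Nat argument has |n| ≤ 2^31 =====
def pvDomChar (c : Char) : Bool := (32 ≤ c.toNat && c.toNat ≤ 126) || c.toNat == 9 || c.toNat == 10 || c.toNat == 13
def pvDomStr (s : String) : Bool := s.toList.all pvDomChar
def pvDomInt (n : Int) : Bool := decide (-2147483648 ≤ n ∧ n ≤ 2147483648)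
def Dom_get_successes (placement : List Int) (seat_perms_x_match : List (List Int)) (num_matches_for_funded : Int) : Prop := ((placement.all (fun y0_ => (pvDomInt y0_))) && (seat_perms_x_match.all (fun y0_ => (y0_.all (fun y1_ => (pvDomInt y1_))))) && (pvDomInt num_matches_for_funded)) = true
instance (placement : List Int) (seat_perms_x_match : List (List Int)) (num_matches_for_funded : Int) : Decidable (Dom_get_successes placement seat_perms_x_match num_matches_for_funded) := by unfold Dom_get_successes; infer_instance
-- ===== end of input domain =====

-- B replaces A's per-rotation rescan (build each rotated list, compare it to the placement) by a single
-- value→positions index of the placement prefix plus one counter bump per equal pair at offset (p-i) mod n.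

-- ===== PORT A =====
-- literal transliteration of A; list indexing is via List.getD, exact because Pre_ keeps every index in range
def get_successes (placement : List Int) (seat_perms_x_match : List (List Int)) (num_matches_for_funded : Int) : List (List Int) :=
  seat_perms_x_match.foldl (fun successes list_to_check =>
    let matching_amount_list := (List.range list_to_check.length).foldl (fun mal (j : Nat) =>
      let rotated_list := PySem.List.slice list_to_check (some (-(j : Int))) none ++
                          PySem.List.slice list_to_check none (some (-(j : Int)))
      let matching := (List.range rotated_list.length).foldl (fun m k =>
        if rotated_list.getD k 0 = placement.getD k 0 then m + 1 else m) (0 : Int)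
      mal ++ [matching]) ([] : List Int)
    if matching_amount_list.all (fun i => decide (i < num_matches_for_funded)) then
      successes ++ [list_to_check]
    else successes) []

-- ===== PORT B =====
-- per-permutation test of Source B; `counts[(p-i)%n] += 1` is `.set`/`.toNat`, exact because
-- 0 ≤ (p-i) mod n < n = counts.length whenever the loop body runs (then n > 0)
def get_successes_alt_ok (placement : List Int) (num_matches_for_funded : Int) (perm : List Int) : Bool :=
  let n := perm.length
  let pos := (List.range n).foldl (fun d p =>
      d.modify (placement.getD p 0) [] (· ++ [(p : Int)])) PySem.Dict.empty
  let counts := (List.range n).foldl (fun counts i =>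
      (pos.getD (perm.getD i 0) []).foldl (fun counts p =>
        counts.set (PySem.Int.mod (p - (i : Int)) (n : Int)).toNat
          (counts.getD (PySem.Int.mod (p - (i : Int)) (n : Int)).toNat 0 + 1)) counts)
    (List.replicate n (0 : Int))
  counts.all (fun c => decide (c < num_matches_for_funded))

def get_successes_alt (placement : List Int) (seat_perms_x_match : List (List Int)) (num_matches_for_funded : Int) : List (List Int) :=
  seat_perms_x_match.foldl (fun successes perm =>
    if get_successes_alt_ok placement num_matches_for_funded perm then
      successes ++ [perm]
    else successes) []

-- ===== PRECONDITION & SPEC =====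
-- Python A indexes placement[k] for every k below a permutation's length, so it raises IndexError
-- exactly when some permutation is longer than the placement; those inputs are outside Pre_.
def Pre_get_successes (placement : List Int) (seat_perms_x_match : List (List Int)) (num_matches_for_funded : Int) : Prop :=
  ∀ l ∈ seat_perms_x_match, l.length ≤ placement.length
instance (placement : List Int) (seat_perms_x_match : List (List Int)) (num_matches_for_funded : Int) : Decidable (Pre_get_successes placement seat_perms_x_match num_matches_for_funded) := by unfold Pre_get_successes; infer_instance
def pvWitness_get_successes : List Int × List (List Int) × Int := ([1, 2, 3], [[1, 2, 3], [2, 1, 3], [3, 1, 2]], 2)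

def Spec_get_successes (placement : List Int) (seat_perms_x_match : List (List Int)) (num_matches_for_funded : Int) (out : List (List Int)) : Prop := out = get_successes_alt placement seat_perms_x_match num_matches_for_funded
instance (placement : List Int) (seat_perms_x_match : List (List Int)) (num_matches_for_funded : Int) (out : List (List Int)) : Decidable (Spec_get_successes placement seat_perms_x_match num_matches_for_funded out) := by unfold Spec_get_successes; infer_instance

-- ===== CLAIM (what is proved, stated in full; the proofs are below) =====
def Claim_equal_get_successes : Prop := ∀ (placement : List Int) (seat_perms_x_match : List (List Int)) (num_matches_for_funded : Int), Dom_get_successes placement seat_perms_x_match num_matches_for_funded → Pre_get_successes placement seat_perms_x_match num_matches_for_funded → Spec_get_successes placement seat_perms_x_match num_matches_for_funded (get_successes placement seat_perms_x_match num_matches_for_funded)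

-- ===== LEMMAS AND PROOFS =====

-- A's per-permutation success test, as a named predicate (definitionally the body of A's fold)
def pAcond (placement : List Int) (num_matches_for_funded : Int) (list_to_check : List Int) : Bool :=
  let matching_amount_list := (List.range list_to_check.length).foldl (fun mal (j : Nat) =>
    let rotated_list := PySem.List.slice list_to_check (some (-(j : Int))) none ++
                        PySem.List.slice list_to_check none (some (-(j : Int)))
    let matching := (List.range rotated_list.length).foldl (fun m k =>
      if rotated_list.getD k 0 = placement.getD k 0 then m + 1 else m) (0 : Int)
    mal ++ [matching]) ([] : List Int)
  matching_amount_list.all (fun i => decide (i < num_matches_for_funded))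

lemma pv_getD_set_self (l : List Int) (i : Nat) (v d : Int) (h : i < l.length) :
    (l.set i v).getD i d = v := by
  simp [List.getD_eq_getElem?_getD, h]

lemma pv_getD_set_ne (l : List Int) (i j : Nat) (v d : Int) (h : i ≠ j) :
    (l.set i v).getD j d = l.getD j d := by
  simp [List.getD_eq_getElem?_getD, h]

lemma pv_inc_length (g : Int → Nat) : ∀ (L : List Int) (cs : List Int),
    (L.foldl (fun cs p => cs.set (g p) (cs.getD (g p) 0 + 1)) cs).length = cs.length
  | [], _ => rfl
  | p :: L, cs => by
      rw [List.foldl_cons, pv_inc_length g L]; exact List.length_set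

lemma pv_inc_getD (g : Int → Nat) (j : Nat) : ∀ (L : List Int) (cs : List Int),
    (∀ p ∈ L, g p < cs.length) →
    (L.foldl (fun cs p => cs.set (g p) (cs.getD (g p) 0 + 1)) cs).getD j 0
      = cs.getD j 0 + ((L.countP (fun p => g p == j) : Nat) : Int)
  | [], cs, _ => by simp
  | p :: L, cs, hg => by
      rw [List.foldl_cons,
        pv_inc_getD g j L _ (fun q hq => by
          rw [List.length_set]; exact hg q (List.mem_cons_of_mem _ hq)),
        List.countP_cons]
      by_cases hpj : g p = j
      · rw [← hpj, pv_getD_set_self _ _ _ _ (hg p (List.mem_cons_self))]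
        simp [hpj]
        ring
      · rw [pv_getD_set_ne _ _ _ _ _ hpj]
        simp [hpj]

lemma pv_outer_length (F : Nat → List Int) (g : Nat → Int → Nat) : ∀ (is : List Nat) (cs : List Int),
    (is.foldl (fun cs i => (F i).foldl (fun cs p => cs.set (g i p) (cs.getD (g i p) 0 + 1)) cs) cs).length = cs.length
  | [], _ => rfl
  | i :: is, cs => by
      rw [List.foldl_cons, pv_outer_length F g is, pv_inc_length]

lemma pv_outer_getD (F : Nat → List Int) (g : Nat → Int → Nat) (j : Nat) : ∀ (is : List Nat) (cs : List Int),
    (∀ i ∈ is, ∀ p ∈ F i, g i p < cs.length) →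
    (is.foldl (fun cs i => (F i).foldl (fun cs p => cs.set (g i p) (cs.getD (g i p) 0 + 1)) cs) cs).getD j 0
      = cs.getD j 0 + (((is.map (fun i => (F i).countP (fun p => g i p == j))).sum : Nat) : Int)
  | [], cs, _ => by simp
  | i :: is, cs, hg => by
      rw [List.foldl_cons,
        pv_outer_getD F g j is _ (fun i' hi' p hp => by
          rw [pv_inc_length]; exact hg i' (List.mem_cons_of_mem _ hi') p hp),
        pv_inc_getD (g i) j (F i) cs (hg i (List.mem_cons_self))]
      simp only [List.map_cons, List.sum_cons]
      push_cast
      ring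

lemma pv_mod_shift (n i j : Nat) (hi : i < n) (hj : j < n) : ((i + j) % n + n - j) % n = i := by
  have h1 : (i + j) % n + n - j = (i + j) % n + (n - j) := by omega
  have h2 : ((i + j) % n + (n - j)) % n = ((i + j) + (n - j)) % n :=
    (Nat.mod_modEq (i + j) n).add_right (n - j)
  have h3 : i + j + (n - j) = i + n := by omega
  rw [h1, h2, h3, Nat.add_mod_right, Nat.mod_eq_of_lt hi]

lemma pv_mod_shift' (n k j : Nat) (hk : k < n) (hj : j < n) : ((k + n - j) % n + j) % n = k := by
  have h1 : k + n - j = k + (n - j) := by omega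
  have h2 : ((k + (n - j)) % n + j) % n = ((k + (n - j)) + j) % n :=
    (Nat.mod_modEq (k + (n - j)) n).add_right j
  have h3 : k + (n - j) + j = k + n := by omega
  rw [h1, h2, h3, Nat.add_mod_right, Nat.mod_eq_of_lt hk]

lemma pv_mod_index_iff (n i j p : Nat) (hi : i < n) (hj : j < n) (hp : p < n) :
    ((p + n - i) % n = j) ↔ p = (i + j) % n := by
  constructor
  · intro e
    rw [← e]
    have h2 : (i + (p + n - i) % n) % n = (i + (p + n - i)) % n :=
      (Nat.mod_modEq (p + n - i) n).add_left i
    have h3 : i + (p + n - i) = p + n := by omega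
    rw [h2, h3, Nat.add_mod_right, Nat.mod_eq_of_lt hp]
  · intro e
    rw [e, Nat.add_comm i j]
    exact pv_mod_shift n j i hj hi

lemma pv_int_mod_toNat (n i p : Nat) (hn : 0 < n) (hi : i < n) :
    (PySem.Int.mod ((p : Int) - (i : Int)) (n : Int)).toNat = (p + n - i) % n := by
  have hpos : (0 : Int) < (n : Int) := by exact_mod_cast hn
  rw [PySem.Int.mod_eq_emod_of_pos hpos]
  have hi' : i ≤ p + n := by omega
  have h1 : (p : Int) - (i : Int) = ((p + n - i : Nat) : Int) - (n : Int) := by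
    push_cast [hi']; ring
  have h2 : ((p + n - i : Nat) : Int) % (n : Int) = (((p + n - i) % n : Nat) : Int) := by
    push_cast; ring
  rw [h1, Int.sub_emod_right, h2]
  omega

lemma pv_countP_range_ite (n c : Nat) (hc : c < n) (b : Nat → Bool) :
    (List.range n).countP (fun p => b p && (p == c)) = if b c then 1 else 0 := by
  by_cases hb : b c
  · rw [List.countP_congr (q := fun p => p == c) (by
      intro a _
      simp only [Bool.and_eq_true, beq_iff_eq]
      exact ⟨fun h => h.2, fun h => ⟨h ▸ hb, h⟩⟩)]
    rw [← List.count_eq_countP, List.count_range]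
    simp [hc, hb]
  · rw [List.countP_congr (q := fun _ => false) (by
      intro a _
      simp only [Bool.and_eq_true, beq_iff_eq, Bool.false_eq_true, iff_false]
      rintro ⟨h1, rfl⟩
      exact hb h1)]
    simp [hb, List.countP_false]

lemma pv_perm_shift (n j : Nat) (hn : 0 < n) (hj : j < n) :
    ((List.range n).map (fun i => (i + j) % n)).Perm (List.range n) := by
  have hinj : ∀ x ∈ List.range n, ∀ y ∈ List.range n, (x + j) % n = (y + j) % n → x = y := by
    intro x hx y hy e
    rw [List.mem_range] at hx hy
    rw [← pv_mod_shift n x j hx hj, ← pv_mod_shift n y j hy hj, e]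
  rw [List.perm_ext_iff_of_nodup (List.Nodup.map_on hinj List.nodup_range) List.nodup_range]
  intro k
  simp only [List.mem_map, List.mem_range]
  constructor
  · rintro ⟨i, _, rfl⟩
    exact Nat.mod_lt _ hn
  · intro hk
    exact ⟨(k + n - j) % n, Nat.mod_lt _ hn, pv_mod_shift' n k j hk hj⟩

lemma pv_all_getD (l : List Int) (p : Int → Bool) :
    l.all p = (List.range l.length).all (fun k => p (l.getD k 0)) := by
  apply Bool.eq_iff_iff.mpr
  simp only [List.all_eq_true, List.mem_range]
  constructor
  · intro H k hk
    rw [List.getD_eq_getElem l 0 hk]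
    exact H _ (List.getElem_mem hk)
  · intro H x hx
    obtain ⟨k, hk, rfl⟩ := List.mem_iff_getElem.mp hx
    have := H k hk
    rwa [List.getD_eq_getElem l 0 hk] at this

lemma pv_all_congr {α : Type} (l : List α) (p q : α → Bool) (h : ∀ a ∈ l, p a = q a) :
    l.all p = l.all q := by
  apply Bool.eq_iff_iff.mpr
  simp only [List.all_eq_true]
  constructor <;> intro H a ha
  · rw [← h a ha]; exact H a ha
  · rw [h a ha]; exact H a ha

lemma pv_rotated_eq (perm : List Int) (j : Nat) :
    PySem.List.slice perm (some (-(j : Int))) none ++ PySem.List.slice perm none (some (-(j : Int)))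
      = perm.drop (perm.length - j) ++ perm.take (perm.length - j) := by
  rcases Nat.eq_zero_or_pos j with h0 | hpos
  · subst h0
    have e : (-(((0 : Nat) : Int))) = (((0 : Nat) : Int)) := by norm_num
    rw [e, PySem.List.slice_from_natCast, PySem.List.slice_to_natCast]
    simp
  · rw [PySem.List.slice_from_neg_natCast perm j hpos, PySem.List.slice_to_neg_natCast perm j hpos]

lemma pv_rotated_length (perm : List Int) (j : Nat) :
    (perm.drop (perm.length - j) ++ perm.take (perm.length - j)).length = perm.length := by
  simp

lemma pv_rotated_getD (perm : List Int) (j k : Nat) (hj : j < perm.length) (hk : k < perm.length) :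
    (perm.drop (perm.length - j) ++ perm.take (perm.length - j)).getD k 0
      = perm.getD ((k + perm.length - j) % perm.length) 0 := by
  have hdlen : (perm.drop (perm.length - j)).length = j := by simp; omega
  by_cases hkj : k < j
  · rw [List.getD_append _ _ _ _ (by omega)]
    have h1 : (perm.drop (perm.length - j)).getD k 0 = perm.getD (perm.length - j + k) 0 := by
      simp [List.getD_eq_getElem?_getD, List.getElem?_drop]
    have h2 : (k + perm.length - j) % perm.length = perm.length - j + k := by
      rw [Nat.mod_eq_of_lt (by omega)]; omega
    rw [h1, h2]
  · rw [List.getD_append_right _ _ _ _ (by omega), hdlen]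
    have h1 : (perm.take (perm.length - j)).getD (k - j) 0 = perm.getD (k - j) 0 := by
      rw [List.getD_eq_getElem?_getD, List.getD_eq_getElem?_getD, List.getElem?_take,
        if_pos (show k - j < perm.length - j by omega)]
    have h2 : (k + perm.length - j) % perm.length = k - j := by
      rw [show k + perm.length - j = (k - j) + perm.length by omega, Nat.add_mod_right,
        Nat.mod_eq_of_lt (by omega)]
    rw [h1, h2]

lemma pv_pos_getD (placement : List Int) (n : Nat) (v : Int) :
    ((List.range n).foldl (fun d p => d.modify (placement.getD p 0) [] (· ++ [(p : Int)])) PySem.Dict.empty).getD v []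
      = ((List.range n).filter (fun p => placement.getD p 0 == v)).map (fun p => ((p : Nat) : Int)) := by
  have h1 : (List.range n).foldl (fun d p => d.modify (placement.getD p 0) [] (· ++ [(p : Int)])) PySem.Dict.empty
      = ((List.range n).map (fun p => (placement.getD p 0, (p : Int)))).foldl
          (fun d q => d.modify q.1 [] (· ++ [q.2])) PySem.Dict.empty := by
    rw [List.foldl_map]
  rw [h1, PySem.Dict.getD_foldl_modify_append]
  simp [List.filter_map, List.map_map, Function.comp_def]

-- the per-permutation tests agree whenever the placement is at least as long as the permutation
lemma pv_ok_eq (placement perm : List Int) (T : Int) (_h : perm.length ≤ placement.length) :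
    pAcond placement T perm = get_successes_alt_ok placement T perm := by
  by_cases hn0 : perm.length = 0
  · rw [List.length_eq_zero_iff.mp hn0]
    rfl
  · have hn : 0 < perm.length := Nat.pos_of_ne_zero hn0
    have hAside : pAcond placement T perm
        = (List.range perm.length).all (fun j => decide
            ((((List.range perm.length).countP (fun k =>
              placement.getD k 0 == perm.getD ((k + perm.length - j) % perm.length) 0) : Nat) : Int) < T)) := by
      unfold pAcond
      simp only []
      rw [PySem.List.foldl_append_singleton_eq_map, List.nil_append, List.all_map]
      apply pv_all_congr
      intro j hj
      have hjn : j < perm.length := List.mem_range.mp hj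
      simp only [Function.comp_apply]
      rw [pv_rotated_eq perm j, pv_rotated_length perm j,
        PySem.List.foldl_ite_add_one, zero_add]
      have hcp : (List.range perm.length).countP
            (fun k => decide ((perm.drop (perm.length - j) ++ perm.take (perm.length - j)).getD k 0
              = placement.getD k 0))
          = (List.range perm.length).countP (fun k =>
              placement.getD k 0 == perm.getD ((k + perm.length - j) % perm.length) 0) := by
        apply List.countP_congr
        intro k hk
        have hkn : k < perm.length := List.mem_range.mp hk
        simp only [decide_eq_true_eq, beq_iff_eq]
        rw [pv_rotated_getD perm j k hjn hkn]
        exact ⟨Eq.symm, Eq.symm⟩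
      rw [hcp]
    have hBside : get_successes_alt_ok placement T perm
        = (List.range perm.length).all (fun j => decide
            ((((List.range perm.length).countP (fun k =>
              placement.getD k 0 == perm.getD ((k + perm.length - j) % perm.length) 0) : Nat) : Int) < T)) := by
      unfold get_successes_alt_ok
      simp only []
      set pos := (List.range perm.length).foldl
          (fun d p => d.modify (placement.getD p 0) [] (· ++ [(p : Int)])) PySem.Dict.empty with hposdef
      have hg : ∀ i ∈ List.range perm.length, ∀ p ∈ pos.getD (perm.getD i 0) [],
          (PySem.Int.mod (p - (i : Int)) ((perm.length : Int))).toNat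
            < (List.replicate perm.length (0 : Int)).length := by
        intro i hi p hp
        have hin : i < perm.length := List.mem_range.mp hi
        rw [hposdef, pv_pos_getD] at hp
        obtain ⟨p', hp', rfl⟩ := List.mem_map.mp hp
        rw [List.length_replicate, pv_int_mod_toNat perm.length i p' hn hin]
        exact Nat.mod_lt _ hn
      have hclen : ((List.range perm.length).foldl (fun counts i =>
            (pos.getD (perm.getD i 0) []).foldl (fun counts p =>
              counts.set (PySem.Int.mod (p - (i : Int)) ((perm.length : Int))).toNat
                (counts.getD (PySem.Int.mod (p - (i : Int)) ((perm.length : Int))).toNat 0 + 1)) counts)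
          (List.replicate perm.length (0 : Int))).length = perm.length := by
        exact (pv_outer_length _ _ _ _).trans List.length_replicate
      have hcnt : ∀ j, j < perm.length → ((List.range perm.length).foldl (fun counts i =>
            (pos.getD (perm.getD i 0) []).foldl (fun counts p =>
              counts.set (PySem.Int.mod (p - (i : Int)) ((perm.length : Int))).toNat
                (counts.getD (PySem.Int.mod (p - (i : Int)) ((perm.length : Int))).toNat 0 + 1)) counts)
          (List.replicate perm.length (0 : Int))).getD j 0
          = (((List.range perm.length).countP (fun k =>
              placement.getD k 0 == perm.getD ((k + perm.length - j) % perm.length) 0) : Nat) : Int) := by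
        intro j hj
        have e1 := pv_outer_getD (fun i => pos.getD (perm.getD i 0) [])
            (fun i p => (PySem.Int.mod (p - (i : Int)) ((perm.length : Int))).toNat) j
            (List.range perm.length) (List.replicate perm.length (0 : Int)) hg
        rw [e1, List.getD_replicate _ hj, zero_add]
        have e2 : ∀ i ∈ List.range perm.length,
            (pos.getD (perm.getD i 0) []).countP
                (fun p => (PySem.Int.mod (p - (i : Int)) ((perm.length : Int))).toNat == j)
              = (if placement.getD ((i + j) % perm.length) 0 == perm.getD i 0 then (1 : Nat) else 0) := by
          intro i hi
          have hin : i < perm.length := List.mem_range.mp hi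
          rw [hposdef, pv_pos_getD, List.countP_map, List.countP_filter]
          simp only [Function.comp_def]
          have hq : ∀ a ∈ List.range perm.length,
              ((PySem.Int.mod (((a : Nat) : Int) - (i : Int)) ((perm.length : Int))).toNat == j
                  && (placement.getD a 0 == perm.getD i 0)) = true
                ↔ ((placement.getD a 0 == perm.getD i 0) && (a == (i + j) % perm.length)) = true := by
            intro a ha
            have han : a < perm.length := List.mem_range.mp ha
            simp only [Bool.and_eq_true, beq_iff_eq]
            rw [pv_int_mod_toNat perm.length i a hn hin,
              pv_mod_index_iff perm.length i j a hin hj han]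
            exact ⟨fun x => ⟨x.2, x.1⟩, fun x => ⟨x.2, x.1⟩⟩
          rw [List.countP_congr hq]
          exact pv_countP_range_ite perm.length ((i + j) % perm.length) (Nat.mod_lt _ hn) _
        rw [List.map_congr_left e2]
        have e4 : ((List.range perm.length).map (fun i =>
              if placement.getD ((i + j) % perm.length) 0 == perm.getD i 0 then (1 : Nat) else 0)).sum
            = (List.range perm.length).countP (fun k =>
              placement.getD k 0 == perm.getD ((k + perm.length - j) % perm.length) 0) := by
          rw [← PySem.List.sum_map_ite_one_zero_nat (fun k =>
            placement.getD k 0 == perm.getD ((k + perm.length - j) % perm.length) 0) (List.range perm.length)]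
          rw [← ((pv_perm_shift perm.length j hn hj).map (fun k =>
            if placement.getD k 0 == perm.getD ((k + perm.length - j) % perm.length) 0
            then (1 : Nat) else 0)).sum_eq]
          rw [List.map_map]
          congr 1
          apply List.map_congr_left
          intro i hi
          have hin := List.mem_range.mp hi
          simp only [Function.comp_apply]
          rw [pv_mod_shift perm.length i j hin hj]
        rw [e4]
      rw [pv_all_getD, hclen]
      apply pv_all_congr
      intro j hj
      have hjn := List.mem_range.mp hj
      rw [hcnt j hjn]
    rw [hAside, hBside]

-- ===== VERDICT (by name: the statement is the Claim_ definition above) =====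
theorem get_successes_spec : Claim_equal_get_successes := by
  intro placement seat_perms_x_match num_matches_for_funded _ hpre
  unfold Spec_get_successes
  have hA : get_successes placement seat_perms_x_match num_matches_for_funded
      = seat_perms_x_match.filter (pAcond placement num_matches_for_funded) := by
    show seat_perms_x_match.foldl
        (fun acc x => if pAcond placement num_matches_for_funded x then acc ++ [x] else acc) []
      = _
    rw [PySem.List.foldl_append_if_eq_filter]
    rfl
  have hB : get_successes_alt placement seat_perms_x_match num_matches_for_funded
      = seat_perms_x_match.filter (get_successes_alt_ok placement num_matches_for_funded) := by
    show seat_perms_x_match.foldl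
        (fun acc x => if get_successes_alt_ok placement num_matches_for_funded x then acc ++ [x] else acc) []
      = _
    rw [PySem.List.foldl_append_if_eq_filter]
    rfl
  rw [hA, hB]
  exact List.filter_congr (fun x hx => pv_ok_eq placement x num_matches_for_funded (hpre x hx))
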